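-- pv_equiv track=rewrite | github.com/Adrian13155/UnifiedPansharpening | channel_Adapt/DynamicChannelAdaptation.py | auto_transpose_params
-- ===== SOURCE A (Python) =====
-- def auto_transpose_params( #根据输入Kernel_Size和Stride等自适应计算padding 与 output_padding
--
--     input_size: int,       # 输入特征图大小，例如 16
--     output_size: int,      # 目标输出图大小，例如 64
--     kernel_size: int,      # 卷积核大小，例如 9
--     stride: int            # 步长，例如 4
-- ):
--     for padding in range(kernel_size):
--         for output_padding in [0, 1]:
--             calc_out = (input_size - 1) * stride - 2 * padding + kernel_size + output_padding
--             if calc_out == output_size: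
--                 return padding,output_padding
--
--     raise ValueError("No valid (padding, output_padding) combination found.")
-- ===== SOURCE B (Python) =====
-- def auto_transpose_params(
--     input_size: int,
--     output_size: int,
--     kernel_size: int,
--     stride: int
-- ):
--     # Closed form: the loop's equation calc_out == output_size is
--     # 2*padding - output_padding == B0, which has a unique solution by parity.
--     b0 = (input_size - 1) * stride + kernel_size - output_size
--     output_padding = b0 % 2
--     padding = (b0 + output_padding) // 2
--     if 0 <= padding < kernel_size:
--         return padding, output_padding
--     raise ValueError("No valid (padding, output_padding) combination found.")
-- ===== Notes on version B (the rewrite author's own statement) =====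
-- stated objective: simpler
-- what changed: Replaces the nested search over range(kernel_size) x [0,1] with the unique closed-form solution of the linear equation (output_padding = parity of B0, padding = (B0+output_padding)//2) plus a range check.
import Mathlib
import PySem

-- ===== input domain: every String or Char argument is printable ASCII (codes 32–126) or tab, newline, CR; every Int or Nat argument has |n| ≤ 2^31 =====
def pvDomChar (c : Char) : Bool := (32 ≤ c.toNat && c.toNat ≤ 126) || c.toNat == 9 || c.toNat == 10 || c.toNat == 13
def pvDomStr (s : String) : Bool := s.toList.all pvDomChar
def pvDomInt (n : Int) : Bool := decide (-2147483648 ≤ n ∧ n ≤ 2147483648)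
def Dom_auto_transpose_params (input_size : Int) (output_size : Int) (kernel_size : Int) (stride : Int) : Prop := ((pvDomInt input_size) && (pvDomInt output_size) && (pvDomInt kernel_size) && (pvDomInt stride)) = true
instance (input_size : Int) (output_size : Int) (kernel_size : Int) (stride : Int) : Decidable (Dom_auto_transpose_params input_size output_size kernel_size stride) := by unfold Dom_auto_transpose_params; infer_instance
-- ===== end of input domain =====

-- B replaces A's nested search over range(kernel_size) × [0,1] with the unique
-- closed-form solution of the linear equation (simpler, O(1)).

-- ===== PORT A =====
-- A's nested for-loop: try padding = 0,1,…,kernel_size-1 and output_padding ∈ [0,1];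
-- returns none where the Python raises ValueError (excluded by Pre_).
def atpSearch (input_size : Int) (output_size : Int) (kernel_size : Int) (stride : Int) : List Int → Option (Int × Int)
  | [] => none
  | padding :: rest =>
    if (input_size - 1) * stride - 2 * padding + kernel_size + 0 = output_size then
      some (padding, 0)
    else if (input_size - 1) * stride - 2 * padding + kernel_size + 1 = output_size then
      some (padding, 1)
    else atpSearch input_size output_size kernel_size stride rest

def auto_transpose_params (input_size : Int) (output_size : Int) (kernel_size : Int) (stride : Int) : Int × Int :=
  (atpSearch input_size output_size kernel_size stride (PySem.List.pyRange 0 kernel_size 1)).getD (0, 0)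

-- ===== PORT B =====
-- Source B: closed form; the (0,0) default stands for Source B's ValueError (excluded by Pre_).
def auto_transpose_params_alt (input_size : Int) (output_size : Int) (kernel_size : Int) (stride : Int) : Int × Int :=
  let b0 := (input_size - 1) * stride + kernel_size - output_size
  let output_padding := PySem.Int.mod b0 2
  let padding := PySem.Int.floordiv (b0 + output_padding) 2
  if 0 ≤ padding ∧ padding < kernel_size then (padding, output_padding) else (0, 0)

-- ===== PRECONDITION & SPEC =====
-- Pre_ excludes exactly the inputs where the Python A raises ValueError
-- (no (padding, output_padding) solves the equation within range).
def Pre_auto_transpose_params (input_size : Int) (output_size : Int) (kernel_size : Int) (stride : Int) : Prop :=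
  let b0 := (input_size - 1) * stride + kernel_size - output_size
  let padding := PySem.Int.floordiv (b0 + PySem.Int.mod b0 2) 2
  0 ≤ padding ∧ padding < kernel_size
instance (input_size : Int) (output_size : Int) (kernel_size : Int) (stride : Int) : Decidable (Pre_auto_transpose_params input_size output_size kernel_size stride) := by unfold Pre_auto_transpose_params; infer_instance

def pvWitness_auto_transpose_params : Int × Int × Int × Int := (16, 64, 9, 4)

def Spec_auto_transpose_params (input_size : Int) (output_size : Int) (kernel_size : Int) (stride : Int) (out : Int × Int) : Prop := out = auto_transpose_params_alt input_size output_size kernel_size stride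
instance (input_size : Int) (output_size : Int) (kernel_size : Int) (stride : Int) (out : Int × Int) : Decidable (Spec_auto_transpose_params input_size output_size kernel_size stride out) := by unfold Spec_auto_transpose_params; infer_instance

-- ===== CLAIM (what is proved, stated in full; the proofs are below) =====
def Claim_equal_auto_transpose_params : Prop := ∀ (input_size : Int) (output_size : Int) (kernel_size : Int) (stride : Int), Dom_auto_transpose_params input_size output_size kernel_size stride → Pre_auto_transpose_params input_size output_size kernel_size stride → Spec_auto_transpose_params input_size output_size kernel_size stride (auto_transpose_params input_size output_size kernel_size stride)

-- ===== LEMMAS AND PROOFS =====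

-- The search returns (p, op) on any list containing p, where (p, op) is the unique
-- solution of 2*p - op = b0 with op ∈ {0,1} (uniqueness by parity).
theorem atpSearch_finds (i o k s b0 p op : Int)
    (hb0 : b0 = (i - 1) * s + k - o)
    (hop : op = PySem.Int.mod b0 2)
    (hp : p = PySem.Int.floordiv (b0 + op) 2) :
    ∀ l : List Int, p ∈ l → atpSearch i o k s l = some (p, op) := by
  rw [PySem.Int.mod_eq_emod_of_pos (by omega)] at hop
  rw [PySem.Int.floordiv_eq_ediv_of_pos (by omega)] at hp
  intro l
  induction l with
  | nil => intro h; exact absurd h (List.not_mem_nil)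
  | cons q rest ih =>
    intro hmem
    simp only [atpSearch]
    by_cases h0 : (i - 1) * s - 2 * q + k + 0 = o
    · obtain ⟨rfl, hop0⟩ : p = q ∧ op = 0 := by constructor <;> omega
      rw [if_pos h0, hop0]
    · by_cases h1 : (i - 1) * s - 2 * q + k + 1 = o
      · obtain ⟨rfl, hop1⟩ : p = q ∧ op = 1 := by constructor <;> omega
        rw [if_neg h0, if_pos h1, hop1]
      · rw [if_neg h0, if_neg h1]
        apply ih
        rcases List.mem_cons.mp hmem with h | h
        · exfalso; omega
        · exact h

-- ===== VERDICT (by name: the statement is the Claim_ definition above) =====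
theorem auto_transpose_params_spec : Claim_equal_auto_transpose_params := by
  intro i o k s _ hpre
  obtain ⟨hp0, hpk⟩ := hpre
  unfold Spec_auto_transpose_params auto_transpose_params auto_transpose_params_alt
  have hmem : PySem.Int.floordiv ((i - 1) * s + k - o + PySem.Int.mod ((i - 1) * s + k - o) 2) 2 ∈ PySem.List.pyRange 0 k 1 := by
    rw [PySem.List.mem_pyRange_one]; exact ⟨hp0, hpk⟩
  rw [atpSearch_finds i o k s ((i - 1) * s + k - o) _ _ rfl rfl rfl _ hmem]
  rw [if_pos ⟨hp0, hpk⟩]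
  rfl
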